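-- pv_equiv track=rewrite | github.com/HAKORADev/telegram-bot | telegram_bot.py | analyze_conversation_timeline
-- ===== SOURCE A (Python) =====
-- def analyze_conversation_timeline(messages):
--     try:
--         if len(messages) < 3:
--             return "New conversation, no long timeline"
--         user_msg_count = sum(1 for msg in messages if msg["role"] == "user")
--         assistant_msg_count = sum(1 for msg in messages if msg["role"] == "assistant")
--         return f"Conversation has {user_msg_count} user messages and {assistant_msg_count} responses"
--     except:
--         return "Cannot analyze timeline"
-- ===== SOURCE B (Python) =====
-- def analyze_conversation_timeline(messages):
--     if len(messages) < 3:
--         return "New conversation, no long timeline"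
--     counts = {}
--     for msg in messages:
--         try:
--             role = msg["role"]
--         except (KeyError, TypeError):
--             return "Cannot analyze timeline"
--         counts[role] = counts.get(role, 0) + 1
--     return f"Conversation has {counts.get('user', 0)} user messages and {counts.get('assistant', 0)} responses"
-- ===== Notes on version B (the rewrite author's own statement) =====
-- stated objective: alternative
-- what changed: B replaces A's two independent full scans (one 0/1-sum per role) with a single pass that builds one role-frequency table and formats from two O(1) lookups; malformed messages are detected during that same pass instead of by a function-wide except.
import Mathlib
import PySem

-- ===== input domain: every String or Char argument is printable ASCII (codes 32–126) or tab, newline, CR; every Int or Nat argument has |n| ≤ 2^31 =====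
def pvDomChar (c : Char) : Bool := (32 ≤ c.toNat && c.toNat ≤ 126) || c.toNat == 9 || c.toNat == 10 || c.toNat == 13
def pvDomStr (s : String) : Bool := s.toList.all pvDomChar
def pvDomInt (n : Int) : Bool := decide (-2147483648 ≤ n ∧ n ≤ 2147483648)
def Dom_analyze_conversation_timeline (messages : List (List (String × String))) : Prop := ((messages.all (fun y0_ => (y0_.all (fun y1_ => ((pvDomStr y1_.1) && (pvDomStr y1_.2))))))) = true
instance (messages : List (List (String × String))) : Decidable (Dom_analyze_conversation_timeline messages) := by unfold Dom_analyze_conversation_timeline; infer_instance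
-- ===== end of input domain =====

-- B folds A's two independent role scans into one pass building a frequency table; same return value everywhere (objective: alternative).

-- ===== PORT A =====
-- sum(1 for msg in messages if msg["role"] == role): none = KeyError raised mid-scan
def pvRoleSumA (messages : List (List (String × String))) (role : String) : Option Int :=
  messages.foldl
    (fun acc msg =>
      acc.bind (fun n =>
        ((PySem.Dict.mk msg).get? "role").map (fun r => if r == role then n + 1 else n)))
    (some 0)

def analyze_conversation_timeline (messages : List (List (String × String))) : String :=
  if messages.length < 3 then "New conversation, no long timeline"
  else
    match pvRoleSumA messages "user" with
    | none => "Cannot analyze timeline"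
    | some user_msg_count =>
      match pvRoleSumA messages "assistant" with
      | none => "Cannot analyze timeline"
      | some assistant_msg_count =>
        String.ofList ("Conversation has ".toList ++ PySem.Int.toChars user_msg_count
          ++ " user messages and ".toList ++ PySem.Int.toChars assistant_msg_count
          ++ " responses".toList)

-- ===== PORT B =====
-- single pass: msg["role"] looked up once; counts[role] = counts.get(role, 0) + 1
def pvTimelineGoB (msgs : List (List (String × String))) (counts : PySem.Dict String Int) : String :=
  match msgs with
  | [] =>
    String.ofList ("Conversation has ".toList ++ PySem.Int.toChars (counts.getD "user" 0)
      ++ " user messages and ".toList ++ PySem.Int.toChars (counts.getD "assistant" 0)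
      ++ " responses".toList)
  | msg :: rest =>
    match (PySem.Dict.mk msg).get? "role" with
    | none => "Cannot analyze timeline"
    | some role => pvTimelineGoB rest (counts.insert role (counts.getD role 0 + 1))

def analyze_conversation_timeline_alt (messages : List (List (String × String))) : String :=
  if messages.length < 3 then "New conversation, no long timeline"
  else pvTimelineGoB messages PySem.Dict.empty

-- ===== PRECONDITION & SPEC =====
def Spec_analyze_conversation_timeline (messages : List (List (String × String))) (out : String) : Prop := out = analyze_conversation_timeline_alt messages
instance (messages : List (List (String × String))) (out : String) : Decidable (Spec_analyze_conversation_timeline messages out) := by unfold Spec_analyze_conversation_timeline; infer_instance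

-- ===== CLAIM (what is proved, stated in full; the proofs are below) =====
def Claim_equal_analyze_conversation_timeline : Prop := ∀ (messages : List (List (String × String))), Dom_analyze_conversation_timeline messages → Spec_analyze_conversation_timeline messages (analyze_conversation_timeline messages)

-- ===== LEMMAS AND PROOFS =====

-- the roles of the messages, none as soon as one lacks "role" (shared characterisation of both loops)
def pvRoles? (msgs : List (List (String × String))) : Option (List String) :=
  match msgs with
  | [] => some []
  | msg :: rest =>
    ((PySem.Dict.mk msg).get? "role").bind (fun r => (pvRoles? rest).map (fun rs => r :: rs))

lemma pvRoleSumA_aux (role : String) (msgs : List (List (String × String))) (n : Int) :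
    msgs.foldl
      (fun acc msg =>
        acc.bind (fun n =>
          ((PySem.Dict.mk msg).get? "role").map (fun r => if r == role then n + 1 else n)))
      (some n)
      = (pvRoles? msgs).map (fun rs => n + ((rs.countP (· == role) : Nat) : Int)) := by
  induction msgs generalizing n with
  | nil => simp [pvRoles?]
  | cons msg rest ih =>
    simp only [List.foldl_cons, pvRoles?, Option.bind_some]
    cases h : (PySem.Dict.mk msg).get? "role" with
    | none =>
      simp only [Option.map_none, Option.bind_none]
      clear ih h
      induction rest with
      | nil => simp
      | cons m r ihr => simpa using ihr
    | some r =>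
      simp only [Option.map_some, ih]
      by_cases hr : r = role
      · simp only [hr, beq_self_eq_true, if_true]
        cases pvRoles? rest with
        | none => simp
        | some rs =>
          simp
          ring
      · simp only [beq_eq_false_iff_ne.mpr hr]
        cases pvRoles? rest with
        | none => simp
        | some rs => simp [hr]

lemma pvRoleSumA_char (messages : List (List (String × String))) (role : String) :
    pvRoleSumA messages role
      = (pvRoles? messages).map (fun rs => ((rs.countP (· == role) : Nat) : Int)) := by
  unfold pvRoleSumA
  rw [pvRoleSumA_aux]
  cases pvRoles? messages <;> simp

lemma pvTimelineGoB_char (msgs : List (List (String × String))) (counts : PySem.Dict String Int) :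
    pvTimelineGoB msgs counts
      = match pvRoles? msgs with
        | none => "Cannot analyze timeline"
        | some rs =>
          String.ofList ("Conversation has ".toList
            ++ PySem.Int.toChars (counts.getD "user" 0 + ((rs.countP (· == "user") : Nat) : Int))
            ++ " user messages and ".toList
            ++ PySem.Int.toChars (counts.getD "assistant" 0 + ((rs.countP (· == "assistant") : Nat) : Int))
            ++ " responses".toList) := by
  induction msgs generalizing counts with
  | nil => simp [pvTimelineGoB, pvRoles?]
  | cons msg rest ih =>
    simp only [pvTimelineGoB, pvRoles?]
    cases h : (PySem.Dict.mk msg).get? "role" with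
    | none => simp
    | some role =>
      simp only [Option.bind_some, ih]
      cases hr : pvRoles? rest with
      | none => simp
      | some rs =>
        simp only [Option.map_some]
        have e1 : (counts.insert role (counts.getD role 0 + 1)).getD "user" 0
              + ((rs.countP (· == "user") : Nat) : Int)
            = counts.getD "user" 0 + (((role :: rs).countP (· == "user") : Nat) : Int) := by
          rw [PySem.Dict.getD_insert]
          by_cases h1 : role = "user"
          · subst h1
            simp
            ring
          · rw [if_neg (fun h => h1 h.symm)]
            simp [h1]
        have e2 : (counts.insert role (counts.getD role 0 + 1)).getD "assistant" 0
              + ((rs.countP (· == "assistant") : Nat) : Int)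
            = counts.getD "assistant" 0 + (((role :: rs).countP (· == "assistant") : Nat) : Int) := by
          rw [PySem.Dict.getD_insert]
          by_cases h2 : role = "assistant"
          · subst h2
            simp
            ring
          · rw [if_neg (fun h => h2 h.symm)]
            simp [h2]
        rw [e1, e2]

-- ===== VERDICT (by name: the statement is the Claim_ definition above) =====
theorem analyze_conversation_timeline_spec : Claim_equal_analyze_conversation_timeline := by
  intro messages _
  unfold Spec_analyze_conversation_timeline analyze_conversation_timeline analyze_conversation_timeline_alt
  by_cases hlen : messages.length < 3
  · simp [hlen]
  · simp only [hlen, if_false]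
    rw [pvTimelineGoB_char, pvRoleSumA_char, pvRoleSumA_char]
    cases pvRoles? messages <;> simp
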